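-- pv_equiv track=rewrite | github.com/motokikando/code_algorithm | ABC/ABC200/B.py | get_two_handred
-- ===== SOURCE A (Python) =====
-- def get_two_handred(n:int, k:int) -> int:
--     ans = n
--     for i in range(k):
--         if ans % 200 == 0:
--             ans = int(ans)
--             ans //= 200
--         else:
--             ans = str(ans) + "200"
--             ans = int(ans)
--     return int(ans)
-- ===== SOURCE B (Python) =====
-- def get_two_handred(n: int, k: int) -> int:
--     # Closed form: after the leading "divide by 200" phase, steps pair up into
--     # x -> 5*x + 1 (x > 0) / x -> 5*x - 1 (x < 0), so p pairs give
--     # 5^p * x + sign * (5^p - 1) // 4, computed with one fast exponentiation.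
--     x = n
--     while k > 0 and x % 200 == 0:
--         if x == 0:
--             return 0
--         x //= 200
--         k -= 1
--     if k <= 0:
--         return x
--     p, r = divmod(k, 2)
--     s = 5 ** p
--     if x > 0:
--         x = s * x + (s - 1) // 4
--         if r:
--             x = 1000 * x + 200
--     else:
--         x = s * x - (s - 1) // 4
--         if r:
--             x = 1000 * x - 200
--     return x
-- ===== Notes on version B (the rewrite author's own statement) =====
-- stated objective: faster
-- what changed: A applies k sequential steps, each doing a decimal str/int round-trip or a division (O(k) big-int string steps, quadratic in the value's digit count); B observes that once the value stops being divisible by 200 the steps pair up into x -> 5x+1 (positive x) / 5x-1 (negative x), and evaluates the remaining k steps with one closed form 5^p*x +/- (5^p-1)//4 via a single fast exponentiation, after a short leading divide-by-200 loop and an O(1) zero fast path.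
import Mathlib
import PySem

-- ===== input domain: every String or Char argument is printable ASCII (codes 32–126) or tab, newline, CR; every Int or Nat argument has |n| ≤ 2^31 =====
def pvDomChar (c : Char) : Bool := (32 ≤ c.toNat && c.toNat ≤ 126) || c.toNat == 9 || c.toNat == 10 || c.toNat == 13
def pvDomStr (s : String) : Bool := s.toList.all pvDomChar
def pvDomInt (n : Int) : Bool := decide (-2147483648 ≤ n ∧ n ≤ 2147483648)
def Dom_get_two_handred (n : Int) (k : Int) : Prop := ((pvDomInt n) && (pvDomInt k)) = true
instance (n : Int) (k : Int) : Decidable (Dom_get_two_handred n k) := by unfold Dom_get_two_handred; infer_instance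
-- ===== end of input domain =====

-- B replaces A's per-step string-append/parse loop by a closed form: after the leading ÷200
-- phase, two steps pair into x ↦ 5x+1 (x>0) / 5x-1 (x<0), computed as 5^p·x ± (5^p-1)//4
-- with one exponentiation.  Objective: faster.

-- ===== PORT A =====
-- one iteration of A's loop body ('ans = int(ans)' and the final 'int(ans)' are identities on
-- an int; int(str(ans) + "200") never raises, so the total-form .getD 0 default is unreachable)
def pyStep (ans : Int) : Int :=
  if PySem.Int.mod ans 200 = 0 then
    PySem.Int.floordiv ans 200
  else
    (PySem.Int.ofStr? (PySem.Int.toStr ans ++ "200")).getD 0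

def get_two_handred (n : Int) (k : Int) : Int :=
  (PySem.List.pyRange 0 k 1).foldl (fun ans _ => pyStep ans) n

-- ===== PORT B =====
-- transliteration of Source B: the while-loop is the recursion (k decreases each division step),
-- then the early returns and the closed-form tail
def get_two_handred_altGo (x : Int) (k : Int) : Int :=
  if h : 0 < k ∧ PySem.Int.mod x 200 = 0 then
    if x = 0 then 0
    else get_two_handred_altGo (PySem.Int.floordiv x 200) (k - 1)
  else if k ≤ 0 then x
  else
    let p := PySem.Int.floordiv k 2
    let r := PySem.Int.mod k 2
    let s : Int := 5 ^ p.toNat     -- 5 ** p with p = k // 2 ≥ 0 here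
    if 0 < x then
      let y := s * x + PySem.Int.floordiv (s - 1) 4
      if r ≠ 0 then 1000 * y + 200 else y
    else
      let y := s * x - PySem.Int.floordiv (s - 1) 4
      if r ≠ 0 then 1000 * y - 200 else y
termination_by k.toNat
decreasing_by omega

def get_two_handred_alt (n : Int) (k : Int) : Int :=
  get_two_handred_altGo n k

-- ===== PRECONDITION & SPEC =====
def Spec_get_two_handred (n : Int) (k : Int) (out : Int) : Prop := out = get_two_handred_alt n k
instance (n : Int) (k : Int) (out : Int) : Decidable (Spec_get_two_handred n k out) := by unfold Spec_get_two_handred; infer_instance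

-- ===== CLAIM (what is proved, stated in full; the proofs are below) =====
def Claim_equal_get_two_handred : Prop := ∀ (n : Int) (k : Int), Dom_get_two_handred n k → Spec_get_two_handred n k (get_two_handred n k)

-- ===== LEMMAS AND PROOFS =====

-- ---- proof-side replicas (definitionally equal) of the private innards of PySem.Int.ofChars? ----
def pvGo : List Char → Bool → Nat → Option Nat
  | [], afterDigit, acc => if afterDigit = true then some acc else none
  | c :: rest, afterDigit, acc =>
    if c.isDigit = true then pvGo rest true (acc * 10 + (c.toNat - '0'.toNat))
    else
      if c = '_' ∧ afterDigit = true then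
        match rest with
        | d :: tail => if d.isDigit = true then pvGo (d :: tail) false acc else none
        | [] => none
      else none

def pvDigitsVal? (x : List Char) : Option Nat :=
  match x with
  | [] => none
  | cs => pvGo cs false 0

def pvOfChars? (s : List Char) : Option Int :=
  match (List.dropWhile PySem.Int.isIntSpace (List.dropWhile PySem.Int.isIntSpace s).reverse).reverse with
  | '-' :: ds => Option.map (fun n => -n) (do let a ← pvDigitsVal? ds; pure ((a : Int)))
  | '+' :: ds => Option.map (fun n => n) (do let a ← pvDigitsVal? ds; pure ((a : Int)))
  | ds => Option.map (fun n => n) (do let a ← pvDigitsVal? ds; pure ((a : Int)))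

-- The innards of PySem.Int.ofChars? (its digit-run parser) are private definitions; pvGo /
-- pvDigitsVal? / pvOfChars? replicate them definitionally and ofChars?_eq_pv bridges to them.
theorem ofChars?_eq_pv (cs : List Char) : PySem.Int.ofChars? cs = pvOfChars? cs := by
  unfold PySem.Int.ofChars? pvOfChars?
  generalize (List.dropWhile PySem.Int.isIntSpace (List.dropWhile PySem.Int.isIntSpace cs).reverse).reverse = l
  rcases l with _ | ⟨c0, t⟩
  · rfl
  · split
    · rename_i ds heq
      injection heq with h1 h2
      subst h1; subst h2
      conv_lhs => whnf
      congr 2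
      rcases t with _ | ⟨c, r⟩
      · rfl
      · conv_lhs => whnf
        rw [show pvDigitsVal? (c :: r) = pvGo (c :: r) false 0 from rfl]
        obtain ⟨b, hb⟩ : ∃ b : Bool, false = b := ⟨false, rfl⟩
        conv_lhs => simp only [show (c = '_' ∧ false = true) = (c = '_' ∧ b = true) from by rw [hb]]
        conv_rhs => rw [hb]
        generalize (0 : Nat) = a
        clear hb
        induction r generalizing c b a with
        | nil =>
            change dite _ _ _ = _
            conv_rhs => rw [pvGo.eq_def]
            by_cases hc : c.isDigit = true
            · rw [dif_pos hc]
              simp only [if_pos hc]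
              rfl
            · rw [dif_neg hc]
              simp only [hc]
              by_cases hu : c = '_' ∧ b = true
              · simp only [if_pos hu]
                rfl
              · simp only [if_neg hu]
                rfl
        | cons d l2 ih =>
            change dite _ _ _ = _
            conv_rhs => rw [pvGo.eq_def]
            by_cases hc : c.isDigit = true
            · rw [dif_pos hc]
              simp only [if_pos hc]
              conv_lhs => whnf
              exact ih d true _
            · rw [dif_neg hc]
              simp only [hc]
              by_cases hu : c = '_' ∧ b = true
              · simp only [if_pos hu]
                by_cases hd : d.isDigit = true
                · simp only [if_pos hd]
                  conv_lhs => whnf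
                  exact ih d false _
                · simp only [if_neg hd]
                  rfl
              · simp only [if_neg hu]
                rfl
    · rename_i ds heq
      injection heq with h1 h2
      subst h1; subst h2
      conv_lhs => whnf
      congr 2
      rcases t with _ | ⟨c, r⟩
      · rfl
      · conv_lhs => whnf
        rw [show pvDigitsVal? (c :: r) = pvGo (c :: r) false 0 from rfl]
        obtain ⟨b, hb⟩ : ∃ b : Bool, false = b := ⟨false, rfl⟩
        conv_lhs => simp only [show (c = '_' ∧ false = true) = (c = '_' ∧ b = true) from by rw [hb]]
        conv_rhs => rw [hb]
        generalize (0 : Nat) = a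
        clear hb
        induction r generalizing c b a with
        | nil =>
            change dite _ _ _ = _
            conv_rhs => rw [pvGo.eq_def]
            by_cases hc : c.isDigit = true
            · rw [dif_pos hc]
              simp only [if_pos hc]
              rfl
            · rw [dif_neg hc]
              simp only [hc]
              by_cases hu : c = '_' ∧ b = true
              · simp only [if_pos hu]
                rfl
              · simp only [if_neg hu]
                rfl
        | cons d l2 ih =>
            change dite _ _ _ = _
            conv_rhs => rw [pvGo.eq_def]
            by_cases hc : c.isDigit = true
            · rw [dif_pos hc]
              simp only [if_pos hc]
              conv_lhs => whnf
              exact ih d true _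
            · rw [dif_neg hc]
              simp only [hc]
              by_cases hu : c = '_' ∧ b = true
              · simp only [if_pos hu]
                by_cases hd : d.isDigit = true
                · simp only [if_pos hd]
                  conv_lhs => whnf
                  exact ih d false _
                · simp only [if_neg hd]
                  rfl
              · simp only [if_neg hu]
                rfl
    · rename_i x1 x2
      conv_lhs => whnf
      split
      · rename_i ds heq
        exact absurd heq (x1 ds)
      · rename_i ds heq
        exact absurd heq (x2 ds)
      · rename_i y1 y2
        congr 2
        clear x1 x2 y1 y2
        conv_lhs => whnf
        rw [show pvDigitsVal? (c0 :: t) = pvGo (c0 :: t) false 0 from rfl]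
        obtain ⟨b, hb⟩ : ∃ b : Bool, false = b := ⟨false, rfl⟩
        conv_lhs => simp only [show (c0 = '_' ∧ false = true) = (c0 = '_' ∧ b = true) from by rw [hb]]
        conv_rhs => rw [hb]
        generalize (0 : Nat) = a
        clear hb
        induction t generalizing c0 b a with
        | nil =>
            change dite _ _ _ = _
            conv_rhs => rw [pvGo.eq_def]
            by_cases hc : c0.isDigit = true
            · rw [dif_pos hc]
              simp only [if_pos hc]
              rfl
            · rw [dif_neg hc]
              simp only [hc]
              by_cases hu : c0 = '_' ∧ b = true
              · simp only [if_pos hu]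
                rfl
              · simp only [if_neg hu]
                rfl
        | cons d l2 ih =>
            change dite _ _ _ = _
            conv_rhs => rw [pvGo.eq_def]
            by_cases hc : c0.isDigit = true
            · rw [dif_pos hc]
              simp only [if_pos hc]
              conv_lhs => whnf
              exact ih d true (a * 10 + (c0.toNat - '0'.toNat))
            · rw [dif_neg hc]
              simp only [hc]
              by_cases hu : c0 = '_' ∧ b = true
              · simp only [if_pos hu]
                by_cases hd : d.isDigit = true
                · simp only [if_pos hd]
                  conv_lhs => whnf
                  exact ih d false a
                · simp only [if_neg hd]
                  rfl
              · simp only [if_neg hu]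
                rfl


-- ---- decimal digit strings and their value ----
def pvVal (acc : Nat) (ds : List Char) : Nat :=
  ds.foldl (fun a c => a * 10 + (c.toNat - 48)) acc

def pvDigits (m : Nat) : List Char :=
  if _h : m < 10 then [Nat.digitChar m]
  else pvDigits (m / 10) ++ [Nat.digitChar (m % 10)]
decreasing_by exact Nat.div_lt_self (by omega) (by omega)

theorem digitChar_isDigit {j : Nat} (h : j < 10) : (Nat.digitChar j).isDigit = true := by
  interval_cases j <;> decide

theorem digitChar_toNat {j : Nat} (h : j < 10) : (Nat.digitChar j).toNat = 48 + j := by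
  interval_cases j <;> decide

theorem pvDigits_ne_nil (m : Nat) : pvDigits m ≠ [] := by
  rw [pvDigits]
  split <;> simp

theorem pvDigits_all_digit (m : Nat) : ∀ c ∈ pvDigits m, c.isDigit = true := by
  induction m using pvDigits.induct with
  | case1 m h => rw [pvDigits, dif_pos h]; simpa using digitChar_isDigit h
  | case2 m h ih =>
      rw [pvDigits, dif_neg h]
      intro c hc
      rcases List.mem_append.1 hc with h1 | h1
      · exact ih c h1
      · simpa using (List.mem_singleton.1 h1) ▸ digitChar_isDigit (Nat.mod_lt _ (by omega))

theorem toDigitsCore_eq (f : Nat) : ∀ (m : Nat) (ds : List Char), m < f →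
    Nat.toDigitsCore 10 f m ds = pvDigits m ++ ds := by
  induction f with
  | zero => omega
  | succ f ih =>
      intro m ds hm
      rw [Nat.toDigitsCore]
      by_cases h0 : m / 10 = 0
      · rw [if_pos h0, pvDigits, dif_pos (by omega)]
        have hmod : m % 10 = m := Nat.mod_eq_of_lt (by omega)
        rw [hmod]
        rfl
      · have hlt : m / 10 < f := by
          have := Nat.div_lt_self (n := m) (by omega) (show 1 < 10 by norm_num)
          omega
        rw [if_neg h0, ih (m / 10) _ hlt]
        conv_rhs => rw [pvDigits, dif_neg (by omega)]
        simp

theorem toDigits_eq_pvDigits (m : Nat) : Nat.toDigits 10 m = pvDigits m := by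
  have := toDigitsCore_eq (m + 1) m [] (by omega)
  simpa [Nat.toDigits] using this

theorem pvVal_snoc (acc : Nat) (ds : List Char) (d : Char) :
    pvVal acc (ds ++ [d]) = pvVal acc ds * 10 + (d.toNat - 48) := by
  simp [pvVal, List.foldl_append]

theorem pvVal_pvDigits (m : Nat) : pvVal 0 (pvDigits m) = m := by
  induction m using pvDigits.induct with
  | case1 m h =>
      rw [pvDigits, dif_pos h]
      simp [pvVal, digitChar_toNat h]
  | case2 m h ih =>
      rw [pvDigits, dif_neg h, pvVal_snoc, ih, digitChar_toNat (Nat.mod_lt _ (by omega))]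
      omega

theorem pvVal_append200 (acc : Nat) (ds : List Char) :
    pvVal acc (ds ++ ['2', '0', '0']) = 1000 * pvVal acc ds + 200 := by
  simp [pvVal, List.foldl_append]
  omega

-- ---- digit characters are neither int()-whitespace nor a sign ----
theorem digit_toNat {c : Char} (h : c.isDigit = true) : 48 ≤ c.toNat ∧ c.toNat ≤ 57 := by
  simp [Char.isDigit] at h
  exact h

theorem digit_not_space {c : Char} (h : c.isDigit = true) : PySem.Int.isIntSpace c = false := by
  obtain ⟨h1, h2⟩ := digit_toNat h
  simp [PySem.Int.isIntSpace]
  and_intros <;> (intro hc; subst hc; simp [Char.toNat] at h1 h2)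

theorem digit_ne {c : Char} (h : c.isDigit = true) : c ≠ '-' ∧ c ≠ '+' := by
  obtain ⟨h1, h2⟩ := digit_toNat h
  constructor <;> (intro hc; subst hc; simp [Char.toNat] at h1 h2)

theorem dropWhile_nonspace (ds : List Char) (h : ∀ c ∈ ds, PySem.Int.isIntSpace c = false) :
    List.dropWhile PySem.Int.isIntSpace ds = ds := by
  cases ds with
  | nil => rfl
  | cons c t => rw [List.dropWhile_cons_of_neg (by simp [h c (by simp)])]

theorem pvGo_digits (ds : List Char) (acc : Nat) (h : ∀ c ∈ ds, c.isDigit = true) :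
    pvGo ds true acc = some (pvVal acc ds) := by
  induction ds generalizing acc with
  | nil => simp [pvGo, pvVal]
  | cons c t ih =>
      have hc : c.isDigit = true := h c (by simp)
      rw [pvGo.eq_def]
      simp only [if_pos hc]
      rw [ih _ (fun x hx => h x (by simp [hx]))]
      rfl

theorem pvDigitsVal?_digits (c : Char) (ds : List Char)
    (h : ∀ x ∈ c :: ds, x.isDigit = true) :
    pvDigitsVal? (c :: ds) = some (pvVal 0 (c :: ds)) := by
  rw [show pvDigitsVal? (c :: ds) = pvGo (c :: ds) false 0 from rfl]
  rw [pvGo.eq_def]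
  simp only [if_pos (h c (by simp))]
  rw [pvGo_digits _ _ (fun x hx => h x (by simp [hx]))]
  rfl

theorem pvOfChars?_digits (c : Char) (ds : List Char)
    (h : ∀ x ∈ c :: ds, x.isDigit = true) :
    pvOfChars? (c :: ds) = some ((pvVal 0 (c :: ds) : Nat) : Int) := by
  have hns : ∀ x ∈ c :: ds, PySem.Int.isIntSpace x = false :=
    fun x hx => digit_not_space (h x hx)
  have hrev : ∀ x ∈ (c :: ds).reverse, PySem.Int.isIntSpace x = false :=
    fun x hx => hns x (List.mem_reverse.1 hx)
  unfold pvOfChars?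
  rw [dropWhile_nonspace _ hns, dropWhile_nonspace _ hrev, List.reverse_reverse]
  have hc := digit_ne (h c (by simp))
  split
  · rename_i ds' heq
    injection heq with h1 _
    exact absurd h1 hc.1
  · rename_i ds' heq
    injection heq with h1 _
    exact absurd h1 hc.2
  · rw [pvDigitsVal?_digits c ds h]
    rfl

theorem pvOfChars?_neg_digits (c : Char) (ds : List Char)
    (h : ∀ x ∈ c :: ds, x.isDigit = true) :
    pvOfChars? ('-' :: c :: ds) = some (-((pvVal 0 (c :: ds) : Nat) : Int)) := by
  have hns : ∀ x ∈ '-' :: c :: ds, PySem.Int.isIntSpace x = false := by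
    intro x hx
    rcases List.mem_cons.1 hx with h1 | h1
    · subst h1; decide
    · exact digit_not_space (h x h1)
  have hrev : ∀ x ∈ ('-' :: c :: ds).reverse, PySem.Int.isIntSpace x = false :=
    fun x hx => hns x (List.mem_reverse.1 hx)
  unfold pvOfChars?
  rw [dropWhile_nonspace _ hns, dropWhile_nonspace _ hrev, List.reverse_reverse]
  split
  · rename_i ds' heq
    injection heq with _ h2
    subst h2
    rw [pvDigitsVal?_digits c ds h]
    rfl
  · rename_i ds' heq
    injection heq with h1 _
    exact absurd h1 (by decide)
  · rename_i x1 x2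
    exact absurd rfl (x1 (c :: ds))

-- the composite 'int(str(x) + "200")' of A's else-branch, as an arithmetic map
theorem parse200 (x : Int) :
    (PySem.Int.ofStr? (PySem.Int.toStr x ++ "200")).getD 0 =
      if 0 ≤ x then 1000 * x + 200 else 1000 * x - 200 := by
  have hlist : (PySem.Int.toStr x ++ "200").toList = PySem.Int.toChars x ++ ['2', '0', '0'] := by
    rw [String.toList_append, PySem.Int.toList_toStr]
    rfl
  rw [show PySem.Int.ofStr? (PySem.Int.toStr x ++ "200")
        = PySem.Int.ofChars? (PySem.Int.toStr x ++ "200").toList from rfl,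
      hlist, ofChars?_eq_pv]
  by_cases hx : 0 ≤ x
  · have hnn : ¬ x < 0 := by omega
    rw [if_pos hx]
    have htc : PySem.Int.toChars x = pvDigits x.toNat := by
      simp [PySem.Int.toChars, hnn, toDigits_eq_pvDigits]
    rw [htc]
    obtain ⟨c, ds, hds⟩ : ∃ c ds, pvDigits x.toNat = c :: ds := by
      rcases hpd : pvDigits x.toNat with _ | ⟨c, ds⟩
      · exact absurd hpd (pvDigits_ne_nil _)
      · exact ⟨c, ds, rfl⟩
    have hdig : ∀ y ∈ c :: (ds ++ ['2', '0', '0']), y.isDigit = true := by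
      intro y hy
      rcases List.mem_cons.1 hy with h1 | h1
      · exact pvDigits_all_digit x.toNat y (by rw [hds]; simp [h1])
      · rcases List.mem_append.1 h1 with h2 | h2
        · exact pvDigits_all_digit x.toNat y (by rw [hds]; simp [h2])
        · simp only [List.mem_cons, List.not_mem_nil, or_false] at h2
          rcases h2 with h3 | h3 | h3 <;> (rw [h3]; decide)
    rw [hds, List.cons_append, pvOfChars?_digits c (ds ++ ['2', '0', '0']) hdig]
    have hval : pvVal 0 (c :: (ds ++ ['2', '0', '0'])) = 1000 * x.toNat + 200 := by
      rw [show c :: (ds ++ ['2', '0', '0']) = (c :: ds) ++ ['2', '0', '0'] from rfl,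
        pvVal_append200, ← hds, pvVal_pvDigits]
    rw [hval]
    simp only [Option.getD_some]
    push_cast
    rw [Int.toNat_of_nonneg hx]
  · have hneg : x < 0 := by omega
    rw [if_neg hx]
    have htc : PySem.Int.toChars x = '-' :: pvDigits x.natAbs := by
      simp [PySem.Int.toChars, hneg, toDigits_eq_pvDigits]
    rw [htc]
    obtain ⟨c, ds, hds⟩ : ∃ c ds, pvDigits x.natAbs = c :: ds := by
      rcases hpd : pvDigits x.natAbs with _ | ⟨c, ds⟩
      · exact absurd hpd (pvDigits_ne_nil _)
      · exact ⟨c, ds, rfl⟩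
    have hdig : ∀ y ∈ c :: (ds ++ ['2', '0', '0']), y.isDigit = true := by
      intro y hy
      rcases List.mem_cons.1 hy with h1 | h1
      · exact pvDigits_all_digit x.natAbs y (by rw [hds]; simp [h1])
      · rcases List.mem_append.1 h1 with h2 | h2
        · exact pvDigits_all_digit x.natAbs y (by rw [hds]; simp [h2])
        · simp only [List.mem_cons, List.not_mem_nil, or_false] at h2
          rcases h2 with h3 | h3 | h3 <;> (rw [h3]; decide)
    rw [hds, List.cons_append, List.cons_append, pvOfChars?_neg_digits c (ds ++ ['2', '0', '0']) hdig]
    have hval : pvVal 0 (c :: (ds ++ ['2', '0', '0'])) = 1000 * x.natAbs + 200 := by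
      rw [show c :: (ds ++ ['2', '0', '0']) = (c :: ds) ++ ['2', '0', '0'] from rfl,
        pvVal_append200, ← hds, pvVal_pvDigits]
    rw [hval]
    simp only [Option.getD_some]
    push_cast
    rw [abs_of_neg hneg]
    ring

-- ---- A's loop as a recursion on the iteration count ----
def pvIter : Nat → Int → Int
  | 0, x => x
  | m + 1, x => pvIter m (pyStep x)

theorem foldl_const_iter (l : List Int) (x : Int) :
    l.foldl (fun a _ => pyStep a) x = pvIter l.length x := by
  induction l generalizing x with
  | nil => rfl
  | cons c t ih => simpa [pvIter] using ih (pyStep x)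

theorem get_two_handred_eq_iter (n k : Int) :
    get_two_handred n k = pvIter k.toNat n := by
  unfold get_two_handred
  rw [foldl_const_iter]
  congr 1
  rw [PySem.List.length_pyRange_one]
  omega

-- the closed-form tail of B, over a Nat step count
def pvFinish (x : Int) (m : Nat) : Int :=
  if 0 < x then
    if m % 2 ≠ 0 then
      1000 * (5 ^ (m / 2) * x + PySem.Int.floordiv (5 ^ (m / 2) - 1) 4) + 200
    else 5 ^ (m / 2) * x + PySem.Int.floordiv (5 ^ (m / 2) - 1) 4
  else
    if m % 2 ≠ 0 then
      1000 * (5 ^ (m / 2) * x - PySem.Int.floordiv (5 ^ (m / 2) - 1) 4) - 200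
    else 5 ^ (m / 2) * x - PySem.Int.floordiv (5 ^ (m / 2) - 1) 4

theorem four_dvd_pow_five_sub_one (p : Nat) : (4 : Int) ∣ 5 ^ p - 1 := by
  induction p with
  | zero => simp
  | succ p ih =>
      have : (5 : Int) ^ (p + 1) - 1 = 5 * (5 ^ p - 1) + 4 := by ring
      rw [this]
      exact dvd_add (Dvd.dvd.mul_left ih 5) dvd_rfl

theorem pyStep_push {x : Int} (h : ¬ (200 : Int) ∣ x) :
    pyStep x = if 0 ≤ x then 1000 * x + 200 else 1000 * x - 200 := by
  unfold pyStep
  rw [if_neg (fun hm => h ((PySem.Int.mod_eq_zero_iff_dvd x 200).1 hm)), parse200]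

theorem pyStep_dvd {x : Int} (h : (200 : Int) ∣ x) :
    pyStep x = PySem.Int.floordiv x 200 := by
  unfold pyStep
  rw [if_pos ((PySem.Int.mod_eq_zero_iff_dvd x 200).2 h)]

theorem floordiv_four_exact (t : Int) : PySem.Int.floordiv (4 * t) 4 = t := by
  rw [PySem.Int.floordiv_eq_ediv_of_pos (by norm_num), Int.mul_ediv_cancel_left _ (by norm_num)]

theorem pvFinish_zero (x : Int) : pvFinish x 0 = x := by
  have h0 : PySem.Int.floordiv ((5:Int) ^ (0 / 2) - 1) 4 = 0 := by decide
  unfold pvFinish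
  rw [h0]
  norm_num

theorem pvFinish_one (x : Int) (hx : x ≠ 0) :
    pvFinish x 1 = if 0 ≤ x then 1000 * x + 200 else 1000 * x - 200 := by
  have h0 : PySem.Int.floordiv ((5:Int) ^ (1 / 2) - 1) 4 = 0 := by decide
  unfold pvFinish
  rw [h0]
  norm_num
  split_ifs <;> omega

theorem pvFinish_step_pos (x : Int) (hx : 0 < x) (m : Nat) :
    pvFinish (5 * x + 1) m = pvFinish x (m + 2) := by
  obtain ⟨t, ht⟩ := four_dvd_pow_five_sub_one (m / 2)
  have hs5 : (5:Int) ^ (m / 2) = 4 * t + 1 := by linarith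
  have hdiv : (m + 2) / 2 = m / 2 + 1 := by omega
  have hmod : (m + 2) % 2 = m % 2 := by omega
  have hfd1 : PySem.Int.floordiv ((5:Int) ^ (m / 2) - 1) 4 = t := by
    rw [ht]; exact floordiv_four_exact t
  have hfd2 : PySem.Int.floordiv ((5:Int) ^ (m / 2 + 1) - 1) 4 = 5 * t + 1 := by
    have h2 : (5:Int) ^ (m / 2 + 1) - 1 = 4 * (5 * t + 1) := by
      rw [pow_succ, hs5]; ring
    rw [h2]; exact floordiv_four_exact _
  unfold pvFinish
  rw [hdiv, hmod, hfd1, hfd2, if_pos (by omega : (0:Int) < 5 * x + 1), if_pos hx, pow_succ]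
  split_ifs with h1 <;> (rw [hs5]; ring)

theorem pvFinish_step_neg (x : Int) (hx : x < 0) (m : Nat) :
    pvFinish (5 * x - 1) m = pvFinish x (m + 2) := by
  obtain ⟨t, ht⟩ := four_dvd_pow_five_sub_one (m / 2)
  have hs5 : (5:Int) ^ (m / 2) = 4 * t + 1 := by linarith
  have hdiv : (m + 2) / 2 = m / 2 + 1 := by omega
  have hmod : (m + 2) % 2 = m % 2 := by omega
  have hfd1 : PySem.Int.floordiv ((5:Int) ^ (m / 2) - 1) 4 = t := by
    rw [ht]; exact floordiv_four_exact t
  have hfd2 : PySem.Int.floordiv ((5:Int) ^ (m / 2 + 1) - 1) 4 = 5 * t + 1 := by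
    have h2 : (5:Int) ^ (m / 2 + 1) - 1 = 4 * (5 * t + 1) := by
      rw [pow_succ, hs5]; ring
    rw [h2]; exact floordiv_four_exact _
  unfold pvFinish
  rw [hdiv, hmod, hfd1, hfd2, if_neg (by omega : ¬ (0:Int) < 5 * x - 1), if_neg (by omega : ¬ (0:Int) < x), pow_succ]
  split_ifs with h1 <;> (rw [hs5]; ring)

theorem iter_eq_finish : ∀ (m : Nat) (x : Int), x ≠ 0 → ¬ (200 : Int) ∣ x →
    pvIter m x = pvFinish x m := by
  intro m
  induction m using Nat.twoStepInduction with
  | zero =>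
      intro x hx hd
      rw [pvFinish_zero]
      rfl
  | one =>
      intro x hx hd
      show pyStep x = pvFinish x 1
      rw [pyStep_push hd, pvFinish_one x hx]
  | more m ih _ =>
      intro x hx hd
      rcases lt_or_gt_of_ne hx with hneg | hpos
      · have hp1 : pyStep x = 1000 * x - 200 := by
          rw [pyStep_push hd, if_neg (by omega)]
        have hdvd : (200:Int) ∣ 1000 * x - 200 := ⟨5 * x - 1, by ring⟩
        have hp2 : pyStep (1000 * x - 200) = 5 * x - 1 := by
          rw [pyStep_dvd hdvd, PySem.Int.floordiv_eq_ediv_of_pos (by norm_num),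
            show (1000 * x - 200 : Int) = 200 * (5 * x - 1) from by ring,
            Int.mul_ediv_cancel_left _ (by norm_num)]
        have hz0 : 5 * x - 1 ≠ 0 := by omega
        have hznd : ¬ (200:Int) ∣ 5 * x - 1 := by
          intro hcon
          obtain ⟨t, htc⟩ := hcon
          omega
        rw [show pvIter (m + 2) x = pvIter m (pyStep (pyStep x)) from rfl,
          hp1, hp2, ih _ hz0 hznd, pvFinish_step_neg x hneg m]
      · have hp1 : pyStep x = 1000 * x + 200 := by
          rw [pyStep_push hd, if_pos (by omega)]
        have hdvd : (200:Int) ∣ 1000 * x + 200 := ⟨5 * x + 1, by ring⟩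
        have hp2 : pyStep (1000 * x + 200) = 5 * x + 1 := by
          rw [pyStep_dvd hdvd, PySem.Int.floordiv_eq_ediv_of_pos (by norm_num),
            show (1000 * x + 200 : Int) = 200 * (5 * x + 1) from by ring,
            Int.mul_ediv_cancel_left _ (by norm_num)]
        have hz0 : 5 * x + 1 ≠ 0 := by omega
        have hznd : ¬ (200:Int) ∣ 5 * x + 1 := by
          intro hcon
          obtain ⟨t, htc⟩ := hcon
          omega
        rw [show pvIter (m + 2) x = pvIter m (pyStep (pyStep x)) from rfl,
          hp1, hp2, ih _ hz0 hznd, pvFinish_step_pos x hpos m]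

theorem pvIter_zero (m : Nat) : pvIter m 0 = 0 := by
  induction m with
  | zero => rfl
  | succ m ih =>
      have : pyStep 0 = 0 := by
        rw [pyStep_dvd ⟨0, by ring⟩]
        rfl
      simp [pvIter, this, ih]

theorem altGo_nonpos (x k : Int) (hk : k ≤ 0) : get_two_handred_altGo x k = x := by
  unfold get_two_handred_altGo
  rw [dif_neg (fun h => absurd h.1 (by omega)), if_pos hk]

theorem main_eq (m : Nat) (x : Int) : pvIter m x = get_two_handred_altGo x (m : Int) := by
  induction m generalizing x with
  | zero =>
      rw [Nat.cast_zero, altGo_nonpos x 0 le_rfl]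
      rfl
  | succ m ih =>
      have hpos : (0:Int) < ((m + 1 : Nat) : Int) := by exact_mod_cast Nat.succ_pos m
      by_cases hdv : PySem.Int.mod x 200 = 0
      · by_cases hx0 : x = 0
        · subst hx0
          rw [show pvIter (m + 1) 0 = pvIter m (pyStep 0) from rfl]
          have hps : pyStep 0 = 0 := by
            rw [pyStep_dvd ⟨0, by ring⟩]
            rfl
          rw [hps, pvIter_zero, get_two_handred_altGo, dif_pos ⟨hpos, by decide⟩, if_pos rfl]
        · rw [show pvIter (m + 1) x = pvIter m (pyStep x) from rfl,
            pyStep_dvd ((PySem.Int.mod_eq_zero_iff_dvd x 200).1 hdv), ih]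
          conv_rhs => rw [get_two_handred_altGo]
          rw [dif_pos ⟨hpos, hdv⟩, if_neg hx0]
          congr 1
          push_cast
          ring
      · have hnd : ¬ (200:Int) ∣ x := fun h => hdv ((PySem.Int.mod_eq_zero_iff_dvd x 200).2 h)
        have hx0 : x ≠ 0 := by
          rintro rfl
          exact hdv (by decide)
        rw [iter_eq_finish (m + 1) x hx0 hnd, get_two_handred_altGo,
          dif_neg (fun h => hdv h.2), if_neg (by omega)]
        have hfd : PySem.Int.floordiv ((m + 1 : Nat) : Int) 2 = (((m + 1) / 2 : Nat) : Int) := by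
          exact_mod_cast PySem.Int.floordiv_natCast (m + 1) 2
        have hmd : PySem.Int.mod ((m + 1 : Nat) : Int) 2 = (((m + 1) % 2 : Nat) : Int) := by
          exact_mod_cast PySem.Int.mod_natCast (m + 1) 2
        simp only [hfd, hmd, Int.toNat_natCast, ne_eq, Nat.cast_eq_zero]
        unfold pvFinish
        split_ifs <;> rfl

-- ===== VERDICT (by name: the statement is the Claim_ definition above) =====
theorem get_two_handred_spec : Claim_equal_get_two_handred := by
  intro n k _
  unfold Spec_get_two_handred get_two_handred_alt
  rw [get_two_handred_eq_iter, main_eq]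
  rcases le_or_gt k 0 with hk | hk
  · have h0 : k.toNat = 0 := by omega
    rw [h0, show ((0 : Nat) : Int) = 0 from rfl,
      altGo_nonpos n 0 le_rfl, altGo_nonpos n k hk]
  · congr 1
    omega
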